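-- pv_equiv track=rewrite | github.com/YorkWong1995/OPC-Harness | src/opc/knowledge/chunker.py | _brace_splits
-- ===== SOURCE A (Python) =====
-- def _brace_splits(lines: list[str]) -> list[int]:
--     """在列0位置 } 后的空行处切分（C/C++/Java/Go 风格）"""
--     points = []
--     for i, line in enumerate(lines):
--         if line.startswith("}") and line.strip() == "}":
--             # 向后找空行
--             for j in range(i + 1, min(i + 5, len(lines))):
--                 if lines[j].strip() == "":
--                     points.append(j)
--                     break
--     return points
-- ===== SOURCE B (Python) =====
-- def _brace_splits(lines: list[str]) -> list[int]:
--     """在列0位置 } 后的空行处切分（C/C++/Java/Go 风格）"""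
--     n = len(lines)
--     # next_blank[k] = smallest j >= k with lines[j].strip() == "", else None
--     next_blank = [None] * (n + 1)
--     for k in range(n - 1, -1, -1):
--         next_blank[k] = k if lines[k].strip() == "" else next_blank[k + 1]
--     points = []
--     for i, line in enumerate(lines):
--         if line.startswith("}") and line.strip() == "}":
--             j = next_blank[i + 1]
--             if j is not None and j <= i + 4:
--                 points.append(j)
--     return points
-- ===== Notes on version B (the rewrite author's own statement) =====
-- stated objective: alternative
-- what changed: Replaces the bounded inner forward scan for a blank line with a next-blank table built in one backward pass, so each brace line does an O(1) lookup plus a window bound check.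
import Mathlib
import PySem

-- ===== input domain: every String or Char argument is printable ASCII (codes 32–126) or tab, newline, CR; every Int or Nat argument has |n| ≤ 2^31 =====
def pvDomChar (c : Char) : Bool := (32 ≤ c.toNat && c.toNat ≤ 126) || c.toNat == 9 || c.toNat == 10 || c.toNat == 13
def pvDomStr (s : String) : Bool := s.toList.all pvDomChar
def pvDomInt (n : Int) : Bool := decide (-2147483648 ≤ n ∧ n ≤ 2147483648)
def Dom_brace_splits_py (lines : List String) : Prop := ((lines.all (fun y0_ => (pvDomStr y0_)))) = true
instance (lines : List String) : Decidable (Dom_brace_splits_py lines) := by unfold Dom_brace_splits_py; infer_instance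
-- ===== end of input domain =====

-- B replaces A's bounded inner forward scan for a blank line with a next-blank
-- table built in one backward pass, then an O(1) lookup plus a window bound check
-- (alternative decomposition; same asymptotic cost).

-- ===== PORT A =====
-- 'line.strip() == ""'
def pvBlank (s : String) : Bool := PySem.Str.strip s == ""

-- the inner 'for j in range(...): if blank: append j; break' as a first-match scan
def pvFindBlank (lines : List String) : List Int → Option Int
  | [] => none
  | j :: rest =>
      if pvBlank (PySem.List.pyGetD lines j "") then some j
      else pvFindBlank lines rest

def brace_splits_py (lines : List String) : List Int :=
  (PySem.List.enumerate lines).foldl (fun points p =>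
    if PySem.Str.startswith p.2 "}" && (PySem.Str.strip p.2 == "}") then
      match pvFindBlank lines
          (PySem.List.pyRange (p.1 + 1) (min (p.1 + 5) (lines.length : Int)) 1) with
      | some j => points ++ [j]
      | none => points
    else points) []

-- ===== PORT B =====
-- backward pass: pvNextBlank ls k has length ls.length + 1; entry m is
-- 'smallest index j ≥ k + m (global numbering) whose line is blank', else none
def pvNextBlank : List String → Int → List (Option Int)
  | [], _ => [none]
  | s :: rest, k =>
      let t := pvNextBlank rest (k + 1)
      (if pvBlank s then some k else t.headD none) :: t

def brace_splits_py_alt (lines : List String) : List Int :=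
  let nb := pvNextBlank lines 0
  (PySem.List.enumerate lines).foldl (fun points p =>
    if PySem.Str.startswith p.2 "}" && (PySem.Str.strip p.2 == "}") then
      match nb.getD (p.1 + 1).toNat none with
      | some j => if j ≤ p.1 + 4 then points ++ [j] else points
      | none => points
    else points) []

-- ===== PRECONDITION & SPEC =====
def Spec_brace_splits_py (lines : List String) (out : List Int) : Prop := out = brace_splits_py_alt lines
instance (lines : List String) (out : List Int) : Decidable (Spec_brace_splits_py lines out) := by unfold Spec_brace_splits_py; infer_instance

-- ===== CLAIM (what is proved, stated in full; the proofs are below) =====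
def Claim_equal_brace_splits_py : Prop := ∀ (lines : List String), Dom_brace_splits_py lines → Spec_brace_splits_py lines (brace_splits_py lines)

-- ===== LEMMAS AND PROOFS =====

-- A's window scan = first blank index ≥ a, kept only if it lands below b
theorem pvFindBlank_pyRange (lines : List String) (a b : Int)
    (ha : 0 ≤ a) (hb : b ≤ (lines.length : Int)) :
    pvFindBlank lines (PySem.List.pyRange a b 1) =
      ((lines.drop a.toNat).findIdx? pvBlank).bind
        (fun t : Nat => if a + (t : Int) < b then some (a + (t : Int)) else none) := by
  by_cases hab : b ≤ a
  · rw [PySem.List.pyRange_one_eq_nil hab]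
    cases hfi : (lines.drop a.toNat).findIdx? pvBlank with
    | none => simp [pvFindBlank]
    | some t =>
        simp only [pvFindBlank, Option.bind_some]
        rw [if_neg (by omega)]
  · have hab' : a < b := by omega
    have hlt : a.toNat < lines.length := by omega
    rw [PySem.List.pyRange_one_cons hab']
    have hget : PySem.List.pyGetD lines a "" = lines[a.toNat] :=
      PySem.List.pyGetD_eq_getElem lines "" ha (by omega)
    have hdrop : lines.drop a.toNat = lines[a.toNat] :: lines.drop (a.toNat + 1) :=
      List.drop_eq_getElem_cons hlt
    simp only [pvFindBlank, hget, hdrop, List.findIdx?_cons]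
    by_cases hbk : pvBlank lines[a.toNat]
    · rw [if_pos hbk, if_pos hbk]
      simp only [Option.bind_some]
      rw [if_pos (by omega)]
      simp
    · rw [if_neg hbk, if_neg hbk]
      have hrec := pvFindBlank_pyRange lines (a + 1) b (by omega) hb
      have hnat : (a + 1).toNat = a.toNat + 1 := by omega
      rw [hrec, hnat]
      cases hfi : (lines.drop (a.toNat + 1)).findIdx? pvBlank with
      | none => simp
      | some t =>
          simp only [Option.map_some, Option.bind_some]
          have : a + 1 + (t : Int) = a + ((t + 1 : Nat) : Int) := by push_cast; ring
          rw [this]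
termination_by (b - a).toNat
decreasing_by omega

-- B's table entry m is the first blank index ≥ m, shifted by the start offset k
theorem pvNextBlank_getD (ls : List String) (k : Int) (m : Nat) (hm : m ≤ ls.length) :
    (pvNextBlank ls k).getD m none =
      ((ls.drop m).findIdx? pvBlank).map (fun t : Nat => k + (m : Int) + (t : Int)) := by
  induction ls generalizing k m with
  | nil =>
      have hm0 : m = 0 := by simpa using hm
      subst hm0
      simp [pvNextBlank]
  | cons s rest ih =>
      cases m with
      | zero =>
          simp only [pvNextBlank, List.getD_cons_zero, List.drop_zero, List.findIdx?_cons]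
          by_cases hbk : pvBlank s
          · simp [hbk]
          · rw [if_neg hbk, if_neg hbk]
            have hhead : (pvNextBlank rest (k + 1)).headD none =
                (pvNextBlank rest (k + 1)).getD 0 none := by
              cases h : pvNextBlank rest (k + 1) <;> simp
            rw [hhead, ih (k + 1) 0 (by omega)]
            simp only [List.drop_zero]
            cases hfi : rest.findIdx? pvBlank with
            | none => rfl
            | some t =>
                simp only [Option.map_some, Option.some.injEq]
                push_cast; ring
      | succ m' =>
          simp only [pvNextBlank, List.getD_cons_succ, List.drop_succ_cons]
          rw [ih (k + 1) m' (by simpa using hm)]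
          cases hfi : (rest.drop m').findIdx? pvBlank with
          | none => rfl
          | some t =>
              simp only [Option.map_some, Option.some.injEq]
              push_cast; ring

theorem brace_splits_py_spec_aux (lines : List String) :
    brace_splits_py lines = brace_splits_py_alt lines := by
  unfold brace_splits_py brace_splits_py_alt
  apply PySem.List.foldl_congr_mem
  intro acc p hp
  rcases (PySem.List.mem_enumerate_iff _ _ _).1 hp with ⟨i, hi, rfl⟩
  simp only [zero_add]
  by_cases hc : PySem.Str.startswith lines[i] "}" && (PySem.Str.strip lines[i] == "}")
  · rw [if_pos hc, if_pos hc]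
    have htn : ((i : Int) + 1).toNat = i + 1 := by omega
    rw [pvFindBlank_pyRange lines ((i : Int) + 1) (min ((i : Int) + 5) (lines.length : Int))
          (by omega) (by omega),
        htn, pvNextBlank_getD lines 0 (i + 1) (by omega)]
    cases hfi : (lines.drop (i + 1)).findIdx? pvBlank with
    | none => simp
    | some t =>
        have ht : t < (lines.drop (i + 1)).length :=
          ((List.findIdx?_eq_some_iff_findIdx_eq).1 hfi).1
        rw [List.length_drop] at ht
        simp only [Option.bind_some, Option.map_some]
        by_cases hwin : (i : Int) + 1 + (t : Int) < min ((i : Int) + 5) (lines.length : Int)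
        · rw [if_pos hwin, if_pos (by push_cast; omega)]
          have hval : (0 : Int) + ((i : Nat) + 1 : Nat) + (t : Int) = (i : Int) + 1 + (t : Int) := by
            push_cast; ring
          rw [hval]
        · rw [if_neg hwin, if_neg (by push_cast; omega)]
  · rw [if_neg hc, if_neg hc]

-- ===== VERDICT (by name: the statement is the Claim_ definition above) =====
theorem brace_splits_py_spec : Claim_equal_brace_splits_py := by
  intro lines _
  unfold Spec_brace_splits_py
  exact brace_splits_py_spec_aux lines
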